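-- pv_equiv track=rewrite | github.com/mihaMaks/2022SegmentationST | evaluation/word_by_word_eval.py | f1_ver3
-- ===== SOURCE A (Python) =====
-- def compare_len(real_segm, pred_segm):
--     real = set()
--     pred = set()
--     c = 0
--     for s in real_segm.split('|'):
--         real.add((c, s))
--         c += len(s)
--     r_len = c
--
--     c = 0
--     for s in pred_segm.split('|'):
--         pred.add((c, s))
--         c += len(s)
--     p_len = c
--
--     if r_len != p_len:
--         return False
--     return True
--
-- def f1_ver3(real_segm, pred_segm):
--     true_positives = false_positives = false_negatives = 0
--     if not compare_len(real_segm, pred_segm):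
--         return 0, 0, 0
--
--     letter_pairs_r = set()
--     letter_pairs_p = set()
--     r = 1
--     for i, l in enumerate(real_segm):
--         if l == '|':
--             letter_pairs_r.add(i - r)
--             r += 1
--     p = 1
--     for i, l in enumerate(pred_segm):
--         if l == '|':
--             letter_pairs_p.add(i - p)
--             p += 1
--     true_positives = len(letter_pairs_p & letter_pairs_r)
--     false_positives = len(letter_pairs_p - letter_pairs_r)
--     false_negatives = len(letter_pairs_r - letter_pairs_p)
--
--     # word is monomorph
--     if not letter_pairs_r:
--         true_positives = 0 if letter_pairs_p else 1
--         false_negatives = 1 if letter_pairs_p else 0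
--     # word is predicted as monomprh
--     if not letter_pairs_p:
--         false_positives = 1 if letter_pairs_r else false_positives
--
--     return true_positives, false_positives, false_negatives
-- ===== SOURCE B (Python) =====
-- def f1_ver3(real_segm, pred_segm):
--     # One pass over the split segments: running total of segment lengths gives
--     # both the boundary positions (total-1 after each non-final segment) and
--     # the non-'|' length used for the length comparison.
--     def scan(s):
--         bounds = set()
--         total = 0
--         parts = s.split('|')
--         for seg in parts[:-1]:
--             total += len(seg)
--             bounds.add(total - 1)
--         return bounds, total + len(parts[-1])
--
--     bounds_r, len_r = scan(real_segm)
--     bounds_p, len_p = scan(pred_segm)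
--     if len_r != len_p:
--         return 0, 0, 0
--     true_positives = len(bounds_p & bounds_r)
--     false_positives = len(bounds_p - bounds_r)
--     false_negatives = len(bounds_r - bounds_p)
--     if not bounds_r:
--         true_positives = 0 if bounds_p else 1
--         false_negatives = 1 if bounds_p else 0
--     if not bounds_p:
--         false_positives = 1 if bounds_r else false_positives
--     return true_positives, false_positives, false_negatives
-- ===== Notes on version B (the rewrite author's own statement) =====
-- stated objective: simpler
-- what changed: B replaces A's per-character enumerate scan with the i-r counter trick (plus a separate split-based length-comparison pass building throwaway (offset, segment) sets) by a single pass over the '|'-split segments whose running total of segment lengths yields both the boundary set (total-1 after each non-final segment) and the non-'|' length used for the length comparison.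
import Mathlib
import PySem

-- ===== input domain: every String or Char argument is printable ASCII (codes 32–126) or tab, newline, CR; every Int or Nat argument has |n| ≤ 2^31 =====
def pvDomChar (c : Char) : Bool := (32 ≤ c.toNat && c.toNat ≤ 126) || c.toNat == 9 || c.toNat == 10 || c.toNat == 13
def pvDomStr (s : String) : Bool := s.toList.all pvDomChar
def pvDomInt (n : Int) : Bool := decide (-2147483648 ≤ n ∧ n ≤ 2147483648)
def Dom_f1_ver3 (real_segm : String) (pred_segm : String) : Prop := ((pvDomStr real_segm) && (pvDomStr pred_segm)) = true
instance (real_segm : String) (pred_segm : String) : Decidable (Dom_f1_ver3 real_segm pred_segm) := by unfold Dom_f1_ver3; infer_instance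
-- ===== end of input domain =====

-- B replaces A's per-character scan (with the i - r counter trick) by one pass
-- over the '|'-split segments, accumulating segment lengths to get both the
-- boundary set and the length used by the length comparison (objective: simpler).

-- ===== PORT A =====
-- step of compare_len's loop: add (c, s) to the set, advance c by len(s)
def pvCmpStep (st : PySem.Set (Int × List Char) × Int) (seg : List Char) :
    PySem.Set (Int × List Char) × Int :=
  (PySem.Set.add st.1 (st.2, seg), st.2 + (seg.length : Int))

-- one of compare_len's two identical loops over s.split('|')
def pvLenScan (s : String) : PySem.Set (Int × List Char) × Int :=
  (PySem.Chars.splitOn s.toList ['|']).foldl pvCmpStep (PySem.Set.empty, 0)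

def compare_len (real_segm : String) (pred_segm : String) : Bool :=
  let r_len := (pvLenScan real_segm).2
  let p_len := (pvLenScan pred_segm).2
  if r_len ≠ p_len then false else true

-- step of A's enumerate loop: at a '|' add (i - r) and bump r
def pvPairStep (st : PySem.Set Int × Int) (p : Int × Char) : PySem.Set Int × Int :=
  if p.2 = '|' then (PySem.Set.add st.1 (p.1 - st.2), st.2 + 1) else st

-- one of f1_ver3's two identical 'for i, l in enumerate(...)' loops
def pvPairs (s : String) : PySem.Set Int :=
  ((PySem.List.enumerate s.toList 0).foldl pvPairStep (PySem.Set.empty, 1)).1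

def f1_ver3 (real_segm : String) (pred_segm : String) : Int × Int × Int :=
  if compare_len real_segm pred_segm = false then (0, 0, 0)
  else
    let letter_pairs_r := pvPairs real_segm
    let letter_pairs_p := pvPairs pred_segm
    let tp := PySem.Set.len (PySem.Set.inter letter_pairs_p letter_pairs_r)
    let fp := PySem.Set.len (PySem.Set.diff letter_pairs_p letter_pairs_r)
    let fn := PySem.Set.len (PySem.Set.diff letter_pairs_r letter_pairs_p)
    let tp := if letter_pairs_r = [] then (if letter_pairs_p ≠ [] then 0 else 1) else tp
    let fn := if letter_pairs_r = [] then (if letter_pairs_p ≠ [] then 1 else 0) else fn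
    let fp := if letter_pairs_p = [] then (if letter_pairs_r ≠ [] then 1 else fp) else fp
    (tp, fp, fn)

-- ===== PORT B =====
-- step of B's loop over parts[:-1]: advance total by len(seg), add total - 1
def pvScanStep (st : PySem.Set Int × Int) (seg : List Char) : PySem.Set Int × Int :=
  let t := st.2 + (seg.length : Int)
  (PySem.Set.add st.1 (t - 1), t)

-- B's scan helper: boundary set and total non-'|' length in one pass
def pvScan (s : String) : PySem.Set Int × Int :=
  let parts := PySem.Chars.splitOn s.toList ['|']
  let st := (PySem.List.slice parts none (some (-1))).foldl pvScanStep (PySem.Set.empty, 0)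
  (st.1, st.2 + ((PySem.List.pyGetD parts (-1) []).length : Int))

def f1_ver3_alt (real_segm : String) (pred_segm : String) : Int × Int × Int :=
  let r := pvScan real_segm
  let p := pvScan pred_segm
  if r.2 ≠ p.2 then (0, 0, 0)
  else
    let bounds_r := r.1
    let bounds_p := p.1
    let tp := PySem.Set.len (PySem.Set.inter bounds_p bounds_r)
    let fp := PySem.Set.len (PySem.Set.diff bounds_p bounds_r)
    let fn := PySem.Set.len (PySem.Set.diff bounds_r bounds_p)
    let tp := if bounds_r = [] then (if bounds_p ≠ [] then 0 else 1) else tp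
    let fn := if bounds_r = [] then (if bounds_p ≠ [] then 1 else 0) else fn
    let fp := if bounds_p = [] then (if bounds_r ≠ [] then 1 else fp) else fp
    (tp, fp, fn)

-- ===== PRECONDITION & SPEC =====
def Spec_f1_ver3 (real_segm : String) (pred_segm : String) (out : Int × Int × Int) : Prop := out = f1_ver3_alt real_segm pred_segm
instance (real_segm : String) (pred_segm : String) (out : Int × Int × Int) : Decidable (Spec_f1_ver3 real_segm pred_segm out) := by unfold Spec_f1_ver3; infer_instance

-- ===== CLAIM (what is proved, stated in full; the proofs are below) =====
def Claim_equal_f1_ver3 : Prop := ∀ (real_segm : String) (pred_segm : String), Dom_f1_ver3 real_segm pred_segm → Spec_f1_ver3 real_segm pred_segm (f1_ver3 real_segm pred_segm)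

-- ===== LEMMAS AND PROOFS =====

-- structural characterization of s.split('|') over the character list
def pvSplit : List Char → List (List Char)
  | [] => [[]]
  | c :: cs =>
    if c = '|' then [] :: pvSplit cs
    else
      match pvSplit cs with
      | [] => [[c]]
      | p :: ps => (c :: p) :: ps

theorem pvSplit_ne_nil (cs : List Char) : pvSplit cs ≠ [] := by
  cases cs with
  | nil => simp [pvSplit]
  | cons c cs =>
    simp only [pvSplit]
    split
    · simp
    · cases h : pvSplit cs <;> simp

theorem pvSplitOn_go_eq (fuel : Nat) (cs cur : List Char) (acc : List (List Char))
    (h : cs.length < fuel) :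
    PySem.Chars.splitOn.go ['|'] fuel cs cur acc
      = acc.reverse ++ (cur.reverse ++ (pvSplit cs).headI) :: (pvSplit cs).tail := by
  induction fuel generalizing cs cur acc with
  | zero => omega
  | succ fuel ih =>
    cases cs with
    | nil => simp [PySem.Chars.splitOn.go, pvSplit]
    | cons c rest =>
      by_cases hc : c = '|'
      · subst hc
        have hpre : List.isPrefixOf ['|'] ('|' :: rest) = true := by
          simp [List.isPrefixOf]
        simp only [PySem.Chars.splitOn.go, hpre, if_pos, List.length_singleton,
          List.drop_succ_cons, List.drop_zero]
        rw [ih rest [] (cur.reverse :: acc) (by simpa using Nat.lt_of_succ_lt_succ h)]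
        rcases hsp : pvSplit rest with _ | ⟨p, ps⟩
        · exact absurd hsp (pvSplit_ne_nil rest)
        · simp [pvSplit, hsp]
      · have hpre : List.isPrefixOf ['|'] (c :: rest) = false := by
          simp only [List.isPrefixOf, Bool.and_true, beq_eq_false_iff_ne]
          exact fun h => hc h.symm
        simp only [PySem.Chars.splitOn.go, hpre, Bool.false_eq_true, if_false]
        rw [ih rest (c :: cur) acc (by simpa using Nat.lt_of_succ_lt_succ h)]
        rcases hsp : pvSplit rest with _ | ⟨p, ps⟩
        · exact absurd hsp (pvSplit_ne_nil rest)
        · simp [pvSplit, hc, hsp]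

theorem pvSplitOn_eq (cs : List Char) :
    PySem.Chars.splitOn cs ['|'] = pvSplit cs := by
  have h := pvSplitOn_go_eq (cs.length + 1) cs [] [] (by omega)
  rcases hsp : pvSplit cs with _ | ⟨p, ps⟩
  · exact absurd hsp (pvSplit_ne_nil cs)
  · simp only [PySem.Chars.splitOn]
    rw [h, hsp]
    simp

-- second component of B's fold: the running total just sums segment lengths
theorem pvScanStep_snd (segs : List (List Char)) (acc : PySem.Set Int) (t : Int) :
    (segs.foldl pvScanStep (acc, t)).2 = t + ((segs.map List.length).sum : Int) := by
  induction segs generalizing acc t with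
  | nil => simp
  | cons s ss ih => simp [pvScanStep, ih]; ring

-- second component of compare_len's fold: same running total
theorem pvCmpStep_snd (segs : List (List Char)) (acc : PySem.Set (Int × List Char)) (t : Int) :
    (segs.foldl pvCmpStep (acc, t)).2 = t + ((segs.map List.length).sum : Int) := by
  induction segs generalizing acc t with
  | nil => simp
  | cons s ss ih => simp [pvCmpStep, ih]; ring

-- the two totals agree
theorem pvLen_eq (s : String) : (pvLenScan s).2 = (pvScan s).2 := by
  simp only [pvLenScan, pvScan, pvSplitOn_eq]
  rcases List.eq_nil_or_concat (pvSplit s.toList) with hsp | ⟨ys, y, hy⟩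
  · exact absurd hsp (pvSplit_ne_nil s.toList)
  · simp only [List.concat_eq_append] at hy
    rw [hy, PySem.List.slice_to_neg_one, PySem.List.pyGetD_neg_one_append_singleton,
        List.dropLast_concat, pvCmpStep_snd, pvScanStep_snd]
    simp

-- main invariant: A's enumerate scan builds the same set as B's segment scan
theorem pvPairs_main (cs : List Char) (acc : PySem.Set Int) (r i0 : Int) :
    ((PySem.List.enumerate cs i0).foldl pvPairStep (acc, r)).1
      = ((pvSplit cs).dropLast.foldl pvScanStep (acc, i0 - r + 1)).1 := by
  induction cs generalizing acc r i0 with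
  | nil => simp [pvSplit]
  | cons c rest ih =>
    rw [PySem.List.enumerate_cons]
    by_cases hc : c = '|'
    · subst hc
      have hstep : pvPairStep (acc, r) (i0, '|') = (PySem.Set.add acc (i0 - r), r + 1) := by
        simp [pvPairStep]
      rw [List.foldl_cons, hstep, ih]
      rcases hsp : pvSplit rest with _ | ⟨p, ps⟩
      · exact absurd hsp (pvSplit_ne_nil rest)
      · have hstep2 : pvScanStep (acc, i0 - r + 1) ([] : List Char)
            = (PySem.Set.add acc (i0 - r), i0 + 1 - (r + 1) + 1) := by
          simp only [pvScanStep, List.length_nil, Nat.cast_zero, add_zero, Prod.mk.injEq]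
          exact ⟨by congr 1; ring, by ring⟩
        simp [pvSplit, hsp, hstep2]
    · simp only [List.foldl_cons, pvPairStep, if_neg hc]
      rw [ih]
      rcases hsp : pvSplit rest with _ | ⟨p, ps⟩
      · exact absurd hsp (pvSplit_ne_nil rest)
      · rcases ps with _ | ⟨q, qs⟩
        · simp [pvSplit, hc, hsp]
        · have hstep2 : pvScanStep (acc, i0 + 1 - r + 1) p
              = pvScanStep (acc, i0 - r + 1) (c :: p) := by
            simp only [pvScanStep, List.length_cons, Prod.mk.injEq]
            push_cast
            exact ⟨by congr 1; ring, by ring⟩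
          simp only [pvSplit, if_neg hc, hsp, List.dropLast_cons₂, List.foldl_cons, hstep2]

-- the two boundary sets agree
theorem pvPairs_eq (s : String) : pvPairs s = (pvScan s).1 := by
  simp only [pvPairs, pvScan, pvSplitOn_eq]
  rcases hsp : pvSplit s.toList with _ | ⟨p, ps⟩
  · exact absurd hsp (pvSplit_ne_nil s.toList)
  · rw [← hsp, pvPairs_main s.toList PySem.Set.empty 1 0, hsp, PySem.List.slice_to_neg_one]
    norm_num

-- ===== VERDICT (by name: the statement is the Claim_ definition above) =====
theorem f1_ver3_spec : Claim_equal_f1_ver3 := by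
  intro real_segm pred_segm _
  unfold Spec_f1_ver3 f1_ver3 f1_ver3_alt compare_len
  rw [pvLen_eq real_segm, pvLen_eq pred_segm, pvPairs_eq real_segm, pvPairs_eq pred_segm]
  by_cases h : (pvScan real_segm).2 = (pvScan pred_segm).2
  · simp [h]
  · simp [h]
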